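-- pv_equiv track=rewrite | github.com/kamalGoku/Meta | GetDominoCount.py | getDominoCountWithInt
-- ===== SOURCE A (Python) =====
-- def getDominoCountWithInt(nums, target) -> int:
--     dMap = {}
--     count = 0
--     for a,b in nums:
--         complimentInt = (target-a)*10 + (target-b)
--         if complimentInt in dMap:
--             count += dMap[complimentInt]
--         intKey = (a*10) + b
--         if intKey in dMap:
--             dMap[intKey] += 1
--         else:
--             dMap[intKey] = 1
--     return count
-- ===== SOURCE B (Python) =====
-- def getDominoCountWithInt(nums, target) -> int:
--     # Build a full frequency table of domino keys, then count complementary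
--     # pairs combinatorially over the distinct keys.
--     cnt = {}
--     for a, b in nums:
--         k = a * 10 + b
--         cnt[k] = cnt.get(k, 0) + 1
--     s = 11 * target
--     total = 0
--     for k, n in cnt.items():
--         c = s - k
--         if k < c:
--             total += n * cnt.get(c, 0)
--         elif k == c:
--             total += n * (n - 1) // 2
--     return total
-- ===== Notes on version B (the rewrite author's own statement) =====
-- stated objective: alternative
-- what changed: Replaces A's incremental one-pass counting (look up the complement among earlier dominoes while growing the map) with a table-first scheme: build the full frequency map of keys a*10+b, then sum cnt[k]*cnt[c] over distinct keys k < c = 11*target-k plus n*(n-1)//2 for self-complementary keys.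
import Mathlib
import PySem

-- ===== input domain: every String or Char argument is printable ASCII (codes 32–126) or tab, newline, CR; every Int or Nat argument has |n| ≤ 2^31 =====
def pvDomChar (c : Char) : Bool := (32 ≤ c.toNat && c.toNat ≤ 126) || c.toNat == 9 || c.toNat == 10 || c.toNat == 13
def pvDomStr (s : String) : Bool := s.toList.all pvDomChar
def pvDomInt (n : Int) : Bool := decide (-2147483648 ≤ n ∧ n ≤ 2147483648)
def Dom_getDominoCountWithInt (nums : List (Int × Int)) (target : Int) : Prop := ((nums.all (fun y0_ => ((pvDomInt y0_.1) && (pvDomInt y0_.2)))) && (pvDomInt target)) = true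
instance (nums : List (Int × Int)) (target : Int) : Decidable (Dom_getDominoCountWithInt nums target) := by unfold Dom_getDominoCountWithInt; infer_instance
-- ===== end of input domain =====

-- B replaces A's incremental one-pass complement counting with a table-first scheme:
-- build the full frequency map of keys, then count pairs combinatorially over distinct keys.


-- ===== PORT A =====
-- the loop of A: state = (dMap, count), one step per domino
def pvGoA (target : Int) : List (Int × Int) → PySem.Dict Int Int → Int → Int
  | [], _, count => count
  | (a, b) :: rest, dMap, count =>
    let complimentInt := (target - a) * 10 + (target - b)
    let count' := if dMap.contains complimentInt then count + dMap.getD complimentInt 0 else count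
    let intKey := a * 10 + b
    let dMap' := if dMap.contains intKey then dMap.modify intKey 0 (· + 1) else dMap.insert intKey 1
    pvGoA target rest dMap' count'

def getDominoCountWithInt (nums : List (Int × Int)) (target : Int) : Int :=
  pvGoA target nums PySem.Dict.empty 0

-- ===== PORT B =====
def getDominoCountWithInt_alt (nums : List (Int × Int)) (target : Int) : Int :=
  let cnt := nums.foldl (fun d p => d.insert (p.1 * 10 + p.2) (d.getD (p.1 * 10 + p.2) 0 + 1)) PySem.Dict.empty
  let s := 11 * target
  cnt.items.foldl (fun total kn =>
    if kn.1 < s - kn.1 then total + kn.2 * cnt.getD (s - kn.1) 0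
    else if kn.1 = s - kn.1 then total + PySem.Int.floordiv (kn.2 * (kn.2 - 1)) 2
    else total) 0

-- ===== PRECONDITION & SPEC =====
def Spec_getDominoCountWithInt (nums : List (Int × Int)) (target : Int) (out : Int) : Prop := out = getDominoCountWithInt_alt nums target
instance (nums : List (Int × Int)) (target : Int) (out : Int) : Decidable (Spec_getDominoCountWithInt nums target out) := by unfold Spec_getDominoCountWithInt; infer_instance

-- ===== CLAIM (what is proved, stated in full; the proofs are below) =====
def Claim_equal_getDominoCountWithInt : Prop := ∀ (nums : List (Int × Int)) (target : Int), Dom_getDominoCountWithInt nums target → Spec_getDominoCountWithInt nums target (getDominoCountWithInt nums target)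

-- ===== LEMMAS AND PROOFS =====

-- list of domino keys
def pvKeys (nums : List (Int × Int)) : List Int := nums.map (fun p => p.1 * 10 + p.2)

-- "prefix" pair counting: pvPre S p t = Σ_j (p ++ t[0:j]).count (S - t[j])
def pvPre (S : Int) : List Int → List Int → Int
  | _, [] => 0
  | p, k :: t => (p.count (S - k) : Int) + pvPre S (p ++ [k]) t

-- per-distinct-key contribution in B's combinatorial count
def pvG (S : Int) (ks : List Int) (k : Int) : Int :=
  if k < S - k then (ks.count k : Int) * (ks.count (S - k) : Int)
  else if k = S - k then PySem.Int.floordiv ((ks.count k : Int) * ((ks.count k : Int) - 1)) 2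
  else 0

lemma pvPre_split (S : Int) : ∀ (t p : List Int),
    pvPre S p t = (t.map (fun x => (p.count (S - x) : Int))).sum + pvPre S [] t := by
  intro t
  induction t with
  | nil => intro p; simp [pvPre]
  | cons k t ih =>
    intro p
    have h1 := ih (p ++ [k])
    have h2 := ih [k]
    simp only [pvPre, h1, List.count_append, List.map, List.sum_cons, List.nil_append]
    rw [h2]
    have : ∀ x : Int, ((p.count x + [k].count x : Nat) : Int)
        = (p.count x : Int) + ([k].count x : Int) := by intro x; push_cast; ring
    simp only [this]
    have : (t.map (fun x => ((p.count (S - x) : Int) + ([k].count (S - x) : Int)))).sum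
        = (t.map (fun x => (p.count (S - x) : Int))).sum
          + (t.map (fun x => ([k].count (S - x) : Int))).sum := by
      rw [← List.sum_map_add]
    rw [this]
    simp only [List.count_nil, Nat.cast_zero]
    ring

lemma pvIte_sum (S k : Int) : ∀ (t : List Int),
    (t.map (fun x => if x = S - k then (1 : Int) else 0)).sum = (t.count (S - k) : Int) := by
  intro t
  induction t with
  | nil => simp
  | cons x t ih =>
    simp only [List.map, List.sum_cons, ih, List.count_cons]
    by_cases hx : x = S - k <;> simp [hx] <;> push_cast <;> ring

lemma pvPre_nil_cons (S k : Int) (t : List Int) :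
    pvPre S [] (k :: t) = (t.count (S - k) : Int) + pvPre S [] t := by
  have h := pvPre_split S t [k]
  have hfun : (fun x : Int => (([k].count (S - x) : Nat) : Int))
      = fun x : Int => if x = S - k then (1 : Int) else 0 := by
    funext x
    by_cases hx : x = S - k
    · have : S - x = k := by omega
      simp [hx]
    · have hne : S - x ≠ k := by omega
      have hz : List.count (S - x) [k] = 0 := List.count_eq_zero.2 (by simpa using hne)
      simp [hz, hx]
  simp only [pvPre, List.nil_append] at *
  rw [h, hfun, pvIte_sum]
  simp

-- invariant tying A's dict to the processed prefix of keys
def pvInv (d : PySem.Dict Int Int) (p : List Int) : Prop :=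
  (∀ k, d.getD k 0 = (p.count k : Int)) ∧ (∀ k, d.contains k = true ↔ k ∈ p)

lemma pvGoA_eq (target : Int) : ∀ (l : List (Int × Int)) (d : PySem.Dict Int Int) (p : List Int) (c : Int),
    pvInv d p → pvGoA target l d c = c + pvPre (11 * target) p (pvKeys l) := by
  intro l
  induction l with
  | nil => intro d p c _; simp [pvGoA, pvKeys, pvPre]
  | cons hd rest ih =>
    rcases hd with ⟨a, b⟩
    intro d p c hinv
    obtain ⟨hget, hcont⟩ := hinv
    simp only [pvGoA, pvKeys, List.map, pvPre]
    have hkey : 11 * target - (a * 10 + b) = (target - a) * 10 + (target - b) := by ring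
    -- count step
    have hcnt : (if d.contains ((target - a) * 10 + (target - b)) then
          c + d.getD ((target - a) * 10 + (target - b)) 0 else c)
        = c + (p.count (11 * target - (a * 10 + b)) : Int) := by
      rw [hkey]
      by_cases h : d.contains ((target - a) * 10 + (target - b)) = true
      · simp [h, hget]
      · have : ((target - a) * 10 + (target - b)) ∉ p := fun hm => h ((hcont _).2 hm)
        simp [h, List.count_eq_zero.2 this]
    -- dict step invariant
    have hinv' : pvInv (if d.contains (a * 10 + b) then d.modify (a * 10 + b) 0 (· + 1)
          else d.insert (a * 10 + b) 1) (p ++ [a * 10 + b]) := by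
      by_cases h : d.contains (a * 10 + b) = true
      · simp only [h, if_true]
        constructor
        · intro k
          rw [PySem.Dict.getD_modify]
          by_cases hk : k = a * 10 + b
          · subst hk
            simp [hget, List.count_append]
          · rw [if_neg hk, hget]
            have hz2 : List.count k [a * 10 + b] = 0 := List.count_eq_zero.2 (by simp [hk])
            rw [List.count_append, hz2, Nat.add_zero]
        · intro k
          rw [PySem.Dict.contains_modify]
          by_cases hk : k = a * 10 + b
          · subst hk; simp [h, List.mem_append]
          · simp [hk, hcont, List.mem_append]
      · have hb : d.contains (a * 10 + b) = false := by simpa using h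
        simp only [hb, Bool.false_eq_true, if_false]
        have hnm : (a * 10 + b) ∉ p := fun hm => h ((hcont _).2 hm)
        constructor
        · intro k
          rw [PySem.Dict.getD_insert]
          by_cases hk : k = a * 10 + b
          · subst hk; simp [List.count_append, List.count_eq_zero.2 hnm]
          · rw [if_neg hk, hget]
            have hz2 : List.count k [a * 10 + b] = 0 := List.count_eq_zero.2 (by simp [hk])
            rw [List.count_append, hz2, Nat.add_zero]
        · intro k
          rw [PySem.Dict.contains_eq_decide_mem_keys, decide_eq_true_iff,
            PySem.Dict.mem_keys_insert]
          constructor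
          · rintro (hk | hk)
            · simp [hk]
            · exact List.mem_append.2 (Or.inl (((hcont k).1 (by
                rw [PySem.Dict.contains_eq_decide_mem_keys]; simp [hk]))))
          · intro hk
            rcases List.mem_append.1 hk with hk | hk
            · exact Or.inr (by
                have := (hcont k).2 hk
                rw [PySem.Dict.contains_eq_decide_mem_keys] at this
                simpa using this)
            · exact Or.inl (by simpa using hk)
    rw [ih _ _ _ hinv', hcnt]
    ring_nf
    simp [pvKeys]

lemma pvA_eq (nums : List (Int × Int)) (target : Int) :
    getDominoCountWithInt nums target = pvPre (11 * target) [] (pvKeys nums) := by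
  have h := pvGoA_eq target nums PySem.Dict.empty [] 0
    ⟨by intro k; simp [PySem.Dict.getD_empty], by intro k; simp [PySem.Dict.contains_empty]⟩
  simpa [getDominoCountWithInt] using h

-- B's second loop is a sum over the items list
lemma pvFoldl_sum (S : Int) (cnt : PySem.Dict Int Int) : ∀ (items : List (Int × Int)) (t : Int),
    items.foldl (fun total kn =>
      if kn.1 < S - kn.1 then total + kn.2 * cnt.getD (S - kn.1) 0
      else if kn.1 = S - kn.1 then total + PySem.Int.floordiv (kn.2 * (kn.2 - 1)) 2
      else total) t
    = t + (items.map (fun kn =>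
      if kn.1 < S - kn.1 then kn.2 * cnt.getD (S - kn.1) 0
      else if kn.1 = S - kn.1 then PySem.Int.floordiv (kn.2 * (kn.2 - 1)) 2
      else 0)).sum := by
  intro items
  induction items with
  | nil => intro t; simp
  | cons kn rest ih =>
    intro t
    simp only [List.foldl, List.map, List.sum_cons, ih]
    split_ifs <;> ring

lemma pvG_zero (S : Int) (ks : List Int) (k : Int) (h : k ∉ ks) : pvG S ks k = 0 := by
  unfold pvG
  rw [List.count_eq_zero.2 h]
  split_ifs <;> simp

lemma pvG_away (S : Int) (x : Int) (ks : List Int) (k : Int) (h1 : k ≠ x) (h2 : k ≠ S - x) :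
    pvG S (x :: ks) k = pvG S ks k := by
  unfold pvG
  have c1 : (x :: ks).count k = ks.count k := List.count_cons_of_ne (by omega : x ≠ k)
  have c2 : (x :: ks).count (S - k) = ks.count (S - k) :=
    List.count_cons_of_ne (by omega : x ≠ S - k)
  rw [c1, c2]

lemma pvFd_step (n : Int) : PySem.Int.floordiv ((n + 1) * n) 2 - PySem.Int.floordiv (n * (n - 1)) 2 = n := by
  have h1 : (n + 1) * n = n * (n - 1) + n * 2 := by ring
  rw [h1, PySem.Int.floordiv_eq_ediv_of_pos (by norm_num),
    PySem.Int.floordiv_eq_ediv_of_pos (by norm_num), Int.add_mul_ediv_right _ _ (by norm_num)]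
  ring

lemma pvMain (S : Int) : ∀ (ks : List Int),
    (∑ k ∈ ks.toFinset, pvG S ks k) = pvPre S [] ks := by
  intro ks
  induction ks with
  | nil => simp [pvPre]
  | cons x ks ih =>
    rw [pvPre_nil_cons, ← ih]
    set T := ks.toFinset with hT
    set U : Finset Int := insert x (insert (S - x) T) with hU
    have hsub1 : (x :: ks).toFinset ⊆ U := by
      intro k hk
      simp only [List.toFinset_cons] at hk
      rcases Finset.mem_insert.1 hk with hk | hk
      · exact Finset.mem_insert.2 (Or.inl hk)
      · exact Finset.mem_insert.2 (Or.inr (Finset.mem_insert.2 (Or.inr hk)))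
    have hsub2 : T ⊆ U := fun k hk => Finset.mem_insert.2 (Or.inr (Finset.mem_insert.2 (Or.inr hk)))
    have e1 : (∑ k ∈ (x :: ks).toFinset, pvG S (x :: ks) k) = ∑ k ∈ U, pvG S (x :: ks) k := by
      apply Finset.sum_subset hsub1
      intro k _ hk
      apply pvG_zero
      intro hm
      exact hk (by simpa using hm)
    have e2 : (∑ k ∈ T, pvG S ks k) = ∑ k ∈ U, pvG S ks k := by
      apply Finset.sum_subset hsub2
      intro k _ hk
      apply pvG_zero
      intro hm
      exact hk (by simpa [hT] using hm)
    rw [e1, e2]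
    have key : (∑ k ∈ U, pvG S (x :: ks) k) - (∑ k ∈ U, pvG S ks k) = (ks.count (S - x) : Int) := by
      rw [← Finset.sum_sub_distrib]
      have hxy : x ∈ U := Finset.mem_insert_self _ _
      have hcy : (S - x) ∈ U := Finset.mem_insert.2 (Or.inr (Finset.mem_insert_self _ _))
      by_cases hself : x = S - x
      · have hUs : ({x} : Finset Int) ⊆ U := by
          intro k hk
          rw [Finset.mem_singleton] at hk
          subst hk
          exact hxy
        rw [← Finset.sum_subset hUs (by
          intro k _ hk
          have h1 : k ≠ x := by simpa using hk
          rw [pvG_away S x ks k h1 (by omega)]; ring)]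
        rw [Finset.sum_singleton]
        unfold pvG
        rw [← hself]
        have hc : (x :: ks).count x = ks.count x + 1 := by simp [List.count_cons]
        rw [hc, if_neg (lt_irrefl x), if_pos rfl]
        push_cast
        have hstep := pvFd_step (ks.count x : Int)
        have harg : ((ks.count x : Int) + 1) * ((ks.count x : Int) + 1 - 1)
            = ((ks.count x : Int) + 1) * (ks.count x : Int) := by ring
        rw [harg]
        omega
      · have hUs : ({x, S - x} : Finset Int) ⊆ U := by
          intro k hk
          rcases Finset.mem_insert.1 hk with hk | hk
          · simpa [hk]
          · rw [Finset.mem_singleton] at hk; simpa [hk]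
        rw [← Finset.sum_subset hUs (by
          intro k _ hk
          simp only [Finset.mem_insert, Finset.mem_singleton, not_or] at hk
          rw [pvG_away S x ks k hk.1 hk.2]; ring)]
        rw [Finset.sum_pair hself]
        have hcx : (x :: ks).count x = ks.count x + 1 := by simp [List.count_cons]
        have hcc : (x :: ks).count (S - x) = ks.count (S - x) := List.count_cons_of_ne (by omega : x ≠ S - x)
        have hSSx : S - (S - x) = x := by omega
        unfold pvG
        rcases lt_trichotomy x (S - x) with hlt | heq | hgt
        · have h1 : ¬ S - x < S - (S - x) := by omega
          have h2 : ¬ S - x = S - (S - x) := by omega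
          rw [hSSx] at h1 h2 ⊢
          simp only [hlt, if_pos, h1, h2]
          rw [hcx, hcc]
          push_cast; ring
        · exact absurd heq hself
        · have h1 : ¬ x < S - x := by omega
          have h2 : S - x < x := hgt
          have h3 : ¬ x = S - x := hself
          rw [hSSx] at *
          simp only [h1, h3, h2, if_pos]
          rw [hcx, hcc]
          push_cast; ring
    have := key
    omega

lemma pvB_eq (nums : List (Int × Int)) (target : Int) :
    getDominoCountWithInt_alt nums target
      = ∑ k ∈ (pvKeys nums).toFinset, pvG (11 * target) (pvKeys nums) k := by
  unfold getDominoCountWithInt_alt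
  have hfold : nums.foldl (fun d p => d.insert (p.1 * 10 + p.2) (d.getD (p.1 * 10 + p.2) 0 + 1)) PySem.Dict.empty
      = PySem.Dict.counter (pvKeys nums) := by
    rw [← PySem.Dict.foldl_insert_getD_add_one_eq_counter, pvKeys, List.foldl_map]
  simp only [hfold]
  rw [pvFoldl_sum, PySem.Dict.items_counter, List.map_map]
  have hmap : ((fun kn : Int × Int =>
        if kn.1 < 11 * target - kn.1 then kn.2 * (PySem.Dict.counter (pvKeys nums)).getD (11 * target - kn.1) 0
        else if kn.1 = 11 * target - kn.1 then PySem.Int.floordiv (kn.2 * (kn.2 - 1)) 2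
        else 0) ∘ (fun k => (k, ((pvKeys nums).count k : Int))))
      = pvG (11 * target) (pvKeys nums) := by
    funext k
    simp only [Function.comp, pvG, PySem.Dict.getD_counter]
  rw [hmap]
  rw [zero_add]
  have hnd : (PySem.Set.ofList (pvKeys nums)).Nodup := PySem.Set.nodup_ofList _
  have hfs : (PySem.Set.ofList (pvKeys nums)).toFinset = (pvKeys nums).toFinset := by
    ext k
    simp [List.mem_toFinset, PySem.Set.mem_ofList]
  rw [← List.sum_toFinset _ hnd, hfs]

-- ===== VERDICT (by name: the statement is the Claim_ definition above) =====
theorem getDominoCountWithInt_spec : Claim_equal_getDominoCountWithInt := by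
  intro nums target _
  unfold Spec_getDominoCountWithInt
  rw [pvA_eq, pvB_eq, pvMain]
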